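-- pv_equiv track=rewrite | github.com/Robotics-Club-IIT-BHU/ModularBot_Planner | dontRun/potential_new.py | list_n
-- ===== SOURCE A (Python) =====
-- def list_n(V,i,j,pre):
--     '''
--     It plans in the neighbourhood to select the neighbouring vertice with minimum value of potential
--     args:
--         PotentialLookUpTable, i_instance, j_instance, previous_vertex(parent)
--     returns:
--         NextVertex
--     '''
--     ## a_dash contains feasible next
--     if(i>0 and j>0):
--         a_dash = [(i,j+1), (i,j-1), (i+1,j+1), (i-1,j+1), (i+1,j-1), (i-1,j-1), (i-1,j), (i+1,j)]
--     elif(i>0 and j==0):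
--         a_dash = [(i,j+1), (i+1,j+1), (i-1,j+1), (i-1,j), (i+1,j)]
--     elif(i==0 and j>0):
--         a_dash = [(i,j+1), (i,j-1), (i+1,j+1), (i+1,j-1), (i+1,j)]
--     else:
--         a_dash = [(i,j+1) , (i+1,j+1), (i+1,j)]
--
--     a_dash.remove(pre) ## of all the vertices removing the parent vertice
--     a=[[0] for i in range(len(a_dash))]
--     for index in range(len(a_dash)):
--         a[index] = V[a_dash[index][0]][a_dash[index][1]] ##choosing the next vertice based on minimum potential value
--     minposition = a.index(min(a))
--     loc = a_dash[minposition]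
--     return loc
-- ===== SOURCE B (Python) =====
-- def list_n(V, i, j, pre):
--     """Pick the neighbouring cell with minimum potential, skipping the parent.
--
--     Single fused pass over the 8 neighbour offsets with a running-best
--     accumulator: no neighbour list, no remove(), no parallel potential array,
--     no index-of-min pass.  The parent must be a neighbour (ValueError otherwise)."""
--     found = False
--     best = None  # (potential, cell) of the best neighbour seen so far
--     for di, dj in ((0, 1), (0, -1), (1, 1), (-1, 1), (1, -1), (-1, -1), (-1, 0), (1, 0)):
--         x, y = i + di, j + dj
--         if (x, y) == pre:
--             found = True
--             continue
--         if x < 0 or y < 0: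
--             continue
--         v = V[x][y]
--         if best is None or v < best[0]:
--             best = (v, (x, y))
--     if not found:
--         raise ValueError(f"{pre} is not in the neighbourhood of ({i}, {j})")
--     return best[1]
-- ===== Notes on version B (the rewrite author's own statement) =====
-- stated objective: alternative
-- what changed: A builds a branch-selected neighbour list, removes the parent, fills a parallel potential array and indexes its minimum; B makes one fused pass over the 8 offsets with a running (potential, cell) accumulator, skipping out-of-grid cells and the parent, so no list, remove() or index-of-min pass exists.
-- outside the precondition, e.g. on list_n([[5, 2], [3, 4]], -1, 0, (0, 1)): A returns (-1, 1), B returns (0, 0); on list_n([[1, 2], [3, 4]], -1, -1, (0, 0)): A returns (0, -1), B raises TypeError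
import Mathlib
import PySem

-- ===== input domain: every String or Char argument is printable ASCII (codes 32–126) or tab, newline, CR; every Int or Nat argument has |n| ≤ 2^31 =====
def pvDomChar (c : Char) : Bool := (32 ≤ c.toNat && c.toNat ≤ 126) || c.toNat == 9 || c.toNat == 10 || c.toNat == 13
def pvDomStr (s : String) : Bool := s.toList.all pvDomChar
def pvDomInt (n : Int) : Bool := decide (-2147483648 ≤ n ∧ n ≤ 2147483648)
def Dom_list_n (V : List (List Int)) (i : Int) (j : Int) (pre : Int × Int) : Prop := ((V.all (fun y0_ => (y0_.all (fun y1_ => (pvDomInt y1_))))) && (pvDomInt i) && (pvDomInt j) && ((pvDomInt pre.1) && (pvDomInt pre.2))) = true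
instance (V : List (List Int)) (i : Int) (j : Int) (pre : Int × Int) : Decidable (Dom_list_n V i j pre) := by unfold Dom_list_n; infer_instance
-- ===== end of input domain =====

-- B replaces A's staged pipeline (branch-selected neighbour list, remove(parent), parallel
-- potential array, index-of-min) by one fused pass over the 8 offsets with a running
-- (potential, cell) accumulator (objective: alternative).


-- ===== PORT A =====
def list_n (V : List (List Int)) (i : Int) (j : Int) (pre : Int × Int) : Int × Int :=
  let a_dash : List (Int × Int) :=
    if i > 0 ∧ j > 0 then
      [(i,j+1), (i,j-1), (i+1,j+1), (i-1,j+1), (i+1,j-1), (i-1,j-1), (i-1,j), (i+1,j)]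
    else if i > 0 ∧ j = 0 then
      [(i,j+1), (i+1,j+1), (i-1,j+1), (i-1,j), (i+1,j)]
    else if i = 0 ∧ j > 0 then
      [(i,j+1), (i,j-1), (i+1,j+1), (i+1,j-1), (i+1,j)]
    else
      [(i,j+1), (i+1,j+1), (i+1,j)]
  match PySem.List.remove? a_dash pre with
  | none => (0, 0)          -- ValueError: pre not a neighbour (excluded by Pre_)
  | some ad =>
    -- a[index] = V[a_dash[index][0]][a_dash[index][1]] for every index
    let a : List Int := ad.map (fun c => PySem.List.pyGetD (PySem.List.pyGetD V c.1 []) c.2 0)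
    match PySem.List.min? a (fun x => x) with
    | none => (0, 0)        -- unreachable under Pre_
    | some m =>
      match PySem.List.index? a m with
      | none => (0, 0)      -- unreachable: m ∈ a
      | some minposition => PySem.List.pyGetD ad (minposition : Int) (0, 0)

-- ===== PORT B =====
-- single fused pass; state = (found parent?, running best (potential, cell));
-- V[x][y] via pyGetD is exact under Pre_ (both indices in range there)
def list_n_alt (V : List (List Int)) (i : Int) (j : Int) (pre : Int × Int) : Int × Int :=
  let offsets : List (Int × Int) := [(0,1), (0,-1), (1,1), (-1,1), (1,-1), (-1,-1), (-1,0), (1,0)]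
  let s : Bool × Option (Int × (Int × Int)) :=
    offsets.foldl (fun s d =>
      let x := i + d.1
      let y := j + d.2
      if (x, y) = pre then (true, s.2)
      else if x < 0 ∨ y < 0 then s
      else
        let v := PySem.List.pyGetD (PySem.List.pyGetD V x []) y 0
        (s.1, match s.2 with
          | none => some (v, (x, y))
          | some b => if v < b.1 then some (v, (x, y)) else some b)) (false, none)
  if s.1 then
    match s.2 with
    | none => (0, 0)        -- Python: best is None, best[1] raises TypeError (excluded by Pre_)
    | some b => b.2
  else (0, 0)               -- Python: raise ValueError, parent not a neighbour (excluded by Pre_)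

-- ===== PRECONDITION & SPEC =====
-- Pre_ restricts to the natural grid domain i ≥ 0, j ≥ 0 (outside it A only returns by relying
-- on Python's negative-index wraparound, an accident of the implementation), requires the parent
-- to be a neighbour (else A raises ValueError) and every other neighbour to be inside the grid
-- (else A raises IndexError).
def Pre_list_n (V : List (List Int)) (i : Int) (j : Int) (pre : Int × Int) : Prop :=
  0 ≤ i ∧ 0 ≤ j ∧
  (let ns : List (Int × Int) :=
    ([((0:Int),(1:Int)), (0,-1), (1,1), (-1,1), (1,-1), (-1,-1), (-1,0), (1,0)].map
      (fun d => (i + d.1, j + d.2))).filter (fun c => decide (0 ≤ c.1 ∧ 0 ≤ c.2))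
   pre ∈ ns ∧ ∀ c ∈ ns, c ≠ pre →
     c.1 < (V.length : Int) ∧ c.2 < ((V.getD c.1.toNat []).length : Int))
instance (V : List (List Int)) (i : Int) (j : Int) (pre : Int × Int) : Decidable (Pre_list_n V i j pre) := by unfold Pre_list_n; infer_instance

def pvWitness_list_n : List (List Int) × Int × Int × (Int × Int) :=
  ([[5, 3, 7], [2, 9, 1], [4, 6, 8]], 1, 1, (0, 1))

def Spec_list_n (V : List (List Int)) (i : Int) (j : Int) (pre : Int × Int) (out : Int × Int) : Prop := out = list_n_alt V i j pre
instance (V : List (List Int)) (i : Int) (j : Int) (pre : Int × Int) (out : Int × Int) : Decidable (Spec_list_n V i j pre out) := by unfold Spec_list_n; infer_instance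

-- ===== CLAIM (what is proved, stated in full; the proofs are below) =====
def Claim_equal_list_n : Prop := ∀ (V : List (List Int)) (i : Int) (j : Int) (pre : Int × Int), Dom_list_n V i j pre → Pre_list_n V i j pre → Spec_list_n V i j pre (list_n V i j pre)

-- ===== LEMMAS AND PROOFS =====

-- The running-minimum fold with a non-empty accumulator, expressed through the empty one.
lemma foldl_min_acc {α : Type} (f : α → Int) (t : List α) : ∀ (x : α),
    t.foldl (fun acc y => match acc with
      | none => some y
      | some m => if f y < f m then some y else some m) (some x)
    = match t.foldl (fun acc y => match acc with
        | none => some y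
        | some m => if f y < f m then some y else some m) none with
      | none => some x
      | some m => if f m < f x then some m else some x := by
  induction t with
  | nil => intro x; rfl
  | cons y t ih =>
    intro x
    simp only [List.foldl_cons]
    rw [ih y]
    by_cases hyx : f y < f x
    · rw [if_pos hyx, ih y]
      cases t.foldl (fun acc y => match acc with
        | none => some y
        | some m => if f y < f m then some y else some m) none with
      | none => simp [hyx]
      | some m => simp only []; split_ifs <;> simp_all <;> omega
    · rw [if_neg hyx, ih x]
      cases t.foldl (fun acc y => match acc with
        | none => some y
        | some m => if f y < f m then some y else some m) none with
      | none => simp [hyx]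
      | some m => simp only []; split_ifs <;> simp_all <;> omega

-- min(x::t, key=f) keeps the FIRST minimal element.
lemma min?_cons {α : Type} (f : α → Int) (x : α) (t : List α) :
    PySem.List.min? (x :: t) f
    = match PySem.List.min? t f with
      | none => some x
      | some m => if f m < f x then some m else some x := by
  simp only [PySem.List.min?, List.foldl_cons]
  exact foldl_min_acc f t x

-- The first f-minimal element b of ad: min picks it, and index-of-min over the mapped
-- keys lands exactly on its position.
lemma sel_aux (f : (Int × Int) → Int) : ∀ (ad : List (Int × Int)), ad ≠ [] →
    ∃ (p : Nat) (b : Int × Int),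
      PySem.List.min? ad f = some b ∧
      PySem.List.min? (ad.map f) (fun x => x) = some (f b) ∧
      PySem.List.index? (ad.map f) (f b) = some p ∧
      PySem.List.pyGetD ad (p : Int) (0, 0) = b := by
  intro ad
  induction ad with
  | nil => intro h; exact absurd rfl h
  | cons x t ih =>
    intro _
    by_cases ht : t = []
    · subst ht
      exact ⟨0, x, by simp [PySem.List.min?], by simp [PySem.List.min?],
        by rw [List.map_cons]; exact PySem.List.index?_cons_self _ _,
        by simp [PySem.List.pyGetD]⟩
    · obtain ⟨p, b, h1, h2, h3, h4⟩ := ih ht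
      by_cases hc : f b < f x
      · refine ⟨p + 1, b, ?_, ?_, ?_, ?_⟩
        · rw [min?_cons, h1]; simp [hc]
        · rw [List.map_cons, min?_cons, h2]; simp [hc]
        · rw [List.map_cons, PySem.List.index?_cons_of_ne (t.map f) (show f x ≠ f b by omega), h3]; rfl
        · rw [show ((p + 1 : Nat) : Int) = (p : Int) + 1 from by push_cast; ring,
            PySem.List.pyGetD, PySem.List.pyGet?_cons_succ]
          exact h4
      · refine ⟨0, x, ?_, ?_, ?_, ?_⟩
        · rw [min?_cons, h1]; simp [hc]
        · rw [List.map_cons, min?_cons, h2]; simp [hc]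
        · rw [List.map_cons]; exact PySem.List.index?_cons_self _ _
        · simp [PySem.List.pyGetD]

-- A's index-of-min pipeline equals a keyed min, for any neighbour list.
lemma sel (f : (Int × Int) → Int) (ad : List (Int × Int)) :
    (match PySem.List.min? (ad.map f) (fun x => x) with
     | none => ((0:Int), (0:Int))
     | some m =>
       match PySem.List.index? (ad.map f) m with
       | none => ((0:Int), (0:Int))
       | some p => PySem.List.pyGetD ad (p : Int) (0, 0))
    = (match PySem.List.min? ad f with
       | none => ((0:Int), (0:Int))
       | some m => m) := by
  by_cases h : ad = []
  · subst h; rfl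
  · obtain ⟨p, b, h1, h2, h3, h4⟩ := sel_aux f ad h
    rw [h1, h2]
    simp only [h3, h4]

-- B's fused guarded fold over offsets = (parent seen among the cells,
-- keyed running-min fold over the filtered cell list).
lemma fused (V : List (List Int)) (i j : Int) (pre : Int × Int) :
    ∀ (ds : List (Int × Int)) (b0 : Bool) (a : Option (Int × Int)),
    ds.foldl (fun s d =>
      let x := i + d.1
      let y := j + d.2
      if (x, y) = pre then (true, s.2)
      else if x < 0 ∨ y < 0 then s
      else
        let v := PySem.List.pyGetD (PySem.List.pyGetD V x []) y 0
        (s.1, match s.2 with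
          | none => some (v, (x, y))
          | some b => if v < b.1 then some (v, (x, y)) else some b))
      (b0, a.map (fun m => (PySem.List.pyGetD (PySem.List.pyGetD V m.1 []) m.2 0, m)))
    = (b0 || decide (pre ∈ ds.map (fun d => (i + d.1, j + d.2))),
       (((ds.map (fun d => (i + d.1, j + d.2))).filter
          (fun c => !(decide (c = pre ∨ c.1 < 0 ∨ c.2 < 0)))).foldl
        (fun acc y => match acc with
          | none => some y
          | some m => if PySem.List.pyGetD (PySem.List.pyGetD V y.1 []) y.2 0
                        < PySem.List.pyGetD (PySem.List.pyGetD V m.1 []) m.2 0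
                      then some y else some m) a).map
        (fun m => (PySem.List.pyGetD (PySem.List.pyGetD V m.1 []) m.2 0, m))) := by
  intro ds
  induction ds with
  | nil => intro b0 a; simp
  | cons d t ih =>
    intro b0 a
    simp only [List.foldl_cons, List.map_cons]
    by_cases h1 : (i + d.1, j + d.2) = pre
    · rw [if_pos h1, List.filter_cons_of_neg (by simp [h1]), ih true a]
      simp [← h1]
    · have hpc : ¬ (pre = (i + d.1, j + d.2)) := fun h => h1 h.symm
      have hb : (b0 || decide (pre ∈ t.map (fun d => (i + d.1, j + d.2))))
          = (b0 || decide (pre ∈ ((i + d.1, j + d.2) :: t.map (fun d => (i + d.1, j + d.2))))) :=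
        congrArg (b0 || ·)
          (decide_eq_decide.mpr (List.mem_cons.trans (or_iff_right hpc)).symm)
      rw [if_neg h1]
      by_cases h2 : (i + d.1) < 0 ∨ (j + d.2) < 0
      · rw [if_pos h2,
          List.filter_cons_of_neg (by
            simp only [Bool.not_eq_true', decide_eq_false_iff_not, not_not]
            exact Or.inr h2),
          ih b0 a]
        exact Prod.ext_iff.mpr ⟨hb, rfl⟩
      · rw [if_neg h2,
          List.filter_cons_of_pos (by
            simp only [Bool.not_eq_true', decide_eq_false_iff_not]
            rintro (h | h)
            · exact h1 h
            · exact h2 h)]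
        cases a with
        | none =>
          simp only [Option.map_none, List.foldl_cons]
          have ih' := ih b0 (some (i + d.1, j + d.2))
          simp only [Option.map_some] at ih'
          rw [ih']
          exact Prod.ext_iff.mpr ⟨hb, rfl⟩
        | some m =>
          simp only [Option.map_some, List.foldl_cons]
          by_cases hlt : PySem.List.pyGetD (PySem.List.pyGetD V (i + d.1) []) (j + d.2) 0
              < PySem.List.pyGetD (PySem.List.pyGetD V m.1 []) m.2 0
          · rw [if_pos hlt, if_pos hlt]
            have ih' := ih b0 (some (i + d.1, j + d.2))
            simp only [Option.map_some] at ih'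
            rw [ih']
            exact Prod.ext_iff.mpr ⟨hb, rfl⟩
          · rw [if_neg hlt, if_neg hlt]
            have ih' := ih b0 (some m)
            simp only [Option.map_some] at ih'
            rw [ih']
            exact Prod.ext_iff.mpr ⟨hb, rfl⟩

-- The fused guard splits into the coordinate filter followed by the parent filter.
lemma filter_split (L : List (Int × Int)) (pre : Int × Int) :
    L.filter (fun c => !(decide (c = pre ∨ c.1 < 0 ∨ c.2 < 0)))
    = (L.filter (fun c => decide (0 ≤ c.1 ∧ 0 ≤ c.2))).filter (fun c => decide (c ≠ pre)) := by
  induction L with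
  | nil => rfl
  | cons c t ih =>
    by_cases h1 : 0 ≤ c.1 ∧ 0 ≤ c.2
    · by_cases h2 : c = pre
      · rw [List.filter_cons_of_neg (by simp [h2]),
            List.filter_cons_of_pos (by simpa using h1),
            List.filter_cons_of_neg (by simp [h2])]
        exact ih
      · rw [List.filter_cons_of_pos (by simp only [Bool.not_eq_true', decide_eq_false_iff_not]; simp [h2]; omega),
            List.filter_cons_of_pos (by simpa using h1),
            List.filter_cons_of_pos (by simpa using h2), ih]
    · rw [List.filter_cons_of_neg (by simp only [Bool.not_eq_true', decide_eq_false_iff_not, not_not]; omega),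
            List.filter_cons_of_neg (by simpa using h1)]
      exact ih

-- remove(pre) on a duplicate-free list containing pre is the filter dropping pre.
lemma remfilter : ∀ (L : List (Int × Int)) (pre : Int × Int), pre ∈ L → L.Nodup →
    PySem.List.remove? L pre = some (L.filter (fun c => decide (c ≠ pre))) := by
  intro L
  induction L with
  | nil => intro pre h; exact absurd h (by simp)
  | cons x t ih =>
    intro pre hmem hnd
    by_cases hx : x = pre
    · have hpre : pre ∉ t := by
        have hx1 := (List.nodup_cons.mp hnd).1
        rwa [hx] at hx1
      rw [hx, PySem.List.remove?_cons_self, List.filter_cons_of_neg (by simp)]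
      congr 1
      refine (List.filter_eq_self.mpr ?_).symm
      intro c hc
      simp only [decide_eq_true_eq]
      intro hcp; exact hpre (hcp ▸ hc)
    · rw [PySem.List.remove?_cons_of_ne _ hx,
        ih pre (by rcases List.mem_cons.mp hmem with h | h; exact absurd h.symm hx; exact h)
          (List.nodup_cons.mp hnd).2,
        List.filter_cons_of_pos (by simpa using hx)]
      rfl

-- B's filtered offset table coincides with A's four branch lists (i, j ≥ 0).
lemma nbrs_pos_pos (i j : Int) (hi : 0 < i) (hj : 0 < j) :
    (([((0:Int),(1:Int)), (0,-1), (1,1), (-1,1), (1,-1), (-1,-1), (-1,0), (1,0)].map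
      (fun d => (i + d.1, j + d.2))).filter (fun c => decide (0 ≤ c.1 ∧ 0 ≤ c.2)))
    = [(i,j+1), (i,j-1), (i+1,j+1), (i-1,j+1), (i+1,j-1), (i-1,j-1), (i-1,j), (i+1,j)] := by
  simp only [List.map_cons, List.map_nil]
  repeat first
    | rw [List.filter_cons_of_pos (by simp only [decide_eq_true_eq]; omega)]
    | rw [List.filter_cons_of_neg (by simp only [decide_eq_true_eq]; omega)]
  simp only [List.filter_nil, List.cons.injEq, Prod.mk.injEq, and_true, true_and]
  omega

lemma nbrs_pos_zero (i j : Int) (hi : 0 < i) (hj : j = 0) :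
    (([((0:Int),(1:Int)), (0,-1), (1,1), (-1,1), (1,-1), (-1,-1), (-1,0), (1,0)].map
      (fun d => (i + d.1, j + d.2))).filter (fun c => decide (0 ≤ c.1 ∧ 0 ≤ c.2)))
    = [(i,j+1), (i+1,j+1), (i-1,j+1), (i-1,j), (i+1,j)] := by
  simp only [List.map_cons, List.map_nil]
  repeat first
    | rw [List.filter_cons_of_pos (by simp only [decide_eq_true_eq]; omega)]
    | rw [List.filter_cons_of_neg (by simp only [decide_eq_true_eq]; omega)]
  simp only [List.filter_nil, List.cons.injEq, Prod.mk.injEq, and_true, true_and]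
  omega

lemma nbrs_zero_pos (i j : Int) (hi : i = 0) (hj : 0 < j) :
    (([((0:Int),(1:Int)), (0,-1), (1,1), (-1,1), (1,-1), (-1,-1), (-1,0), (1,0)].map
      (fun d => (i + d.1, j + d.2))).filter (fun c => decide (0 ≤ c.1 ∧ 0 ≤ c.2)))
    = [(i,j+1), (i,j-1), (i+1,j+1), (i+1,j-1), (i+1,j)] := by
  simp only [List.map_cons, List.map_nil]
  repeat first
    | rw [List.filter_cons_of_pos (by simp only [decide_eq_true_eq]; omega)]
    | rw [List.filter_cons_of_neg (by simp only [decide_eq_true_eq]; omega)]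
  simp only [List.filter_nil, List.cons.injEq, Prod.mk.injEq, and_true, true_and]
  omega

lemma nbrs_zero_zero (i j : Int) (hi : i = 0) (hj : j = 0) :
    (([((0:Int),(1:Int)), (0,-1), (1,1), (-1,1), (1,-1), (-1,-1), (-1,0), (1,0)].map
      (fun d => (i + d.1, j + d.2))).filter (fun c => decide (0 ≤ c.1 ∧ 0 ≤ c.2)))
    = [(i,j+1), (i+1,j+1), (i+1,j)] := by
  simp only [List.map_cons, List.map_nil]
  repeat first
    | rw [List.filter_cons_of_pos (by simp only [decide_eq_true_eq]; omega)]
    | rw [List.filter_cons_of_neg (by simp only [decide_eq_true_eq]; omega)]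
  simp only [List.filter_nil, List.cons.injEq, Prod.mk.injEq, and_true, true_and]
  omega

-- A's body on a duplicate-free branch list containing pre equals B's fused result on it.
lemma body_eq (V : List (List Int)) (i j : Int) (L : List (Int × Int)) (pre : Int × Int)
    (hL : ([((0:Int),(1:Int)), (0,-1), (1,1), (-1,1), (1,-1), (-1,-1), (-1,0), (1,0)].map
        (fun d => (i + d.1, j + d.2))).filter (fun c => decide (0 ≤ c.1 ∧ 0 ≤ c.2)) = L)
    (hmem : pre ∈ L) (hnd : L.Nodup) :
    (match PySem.List.remove? L pre with
     | none => ((0:Int), (0:Int))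
     | some ad =>
       match PySem.List.min?
           (ad.map (fun c => PySem.List.pyGetD (PySem.List.pyGetD V c.1 []) c.2 0))
           (fun x => x) with
       | none => ((0:Int), (0:Int))
       | some m =>
         match PySem.List.index?
             (ad.map (fun c => PySem.List.pyGetD (PySem.List.pyGetD V c.1 []) c.2 0)) m with
         | none => ((0:Int), (0:Int))
         | some minposition => PySem.List.pyGetD ad (minposition : Int) (0, 0))
    = list_n_alt V i j pre := by
  simp only [remfilter L pre hmem hnd]
  rw [sel (fun c => PySem.List.pyGetD (PySem.List.pyGetD V c.1 []) c.2 0)]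
  unfold list_n_alt
  dsimp only
  have hf := fused V i j pre [(0,1), (0,-1), (1,1), (-1,1), (1,-1), (-1,-1), (-1,0), (1,0)] false none
  simp only [Option.map_none] at hf
  rw [hf, filter_split, hL]
  have hpm : pre ∈ ([((0:Int),(1:Int)), (0,-1), (1,1), (-1,1), (1,-1), (-1,-1), (-1,0), (1,0)].map
      (fun d => (i + d.1, j + d.2))) := by
    rw [← hL] at hmem
    exact List.mem_of_mem_filter hmem
  rw [decide_eq_true hpm, Bool.or_true]
  have hr : (L.filter (fun c => decide (c ≠ pre))).foldl
      (fun acc y => match acc with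
        | none => some y
        | some m => if PySem.List.pyGetD (PySem.List.pyGetD V y.1 []) y.2 0
                      < PySem.List.pyGetD (PySem.List.pyGetD V m.1 []) m.2 0
                    then some y else some m) none
      = PySem.List.min? (L.filter (fun c => decide (c ≠ pre)))
          (fun c => PySem.List.pyGetD (PySem.List.pyGetD V c.1 []) c.2 0) := by
    simp only [PySem.List.min?]
    congr 1
    funext acc y
    cases acc <;> rfl
  rw [hr]
  cases hq : PySem.List.min? (L.filter (fun c => decide (c ≠ pre)))
      (fun c => PySem.List.pyGetD (PySem.List.pyGetD V c.1 []) c.2 0) with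
  | none => rfl
  | some m => rfl

-- ===== VERDICT (by name: the statement is the Claim_ definition above) =====
theorem list_n_spec : Claim_equal_list_n := by
  intro V i j pre _ hpre
  obtain ⟨hi, hj, hmem, -⟩ := hpre
  unfold Spec_list_n list_n
  dsimp only
  have hi' : i = 0 ∨ 0 < i := by omega
  have hj' : j = 0 ∨ 0 < j := by omega
  rcases hi' with hi0 | hi0 <;> rcases hj' with hj0 | hj0
  · rw [if_neg (by omega), if_neg (by omega), if_neg (by omega)]
    refine body_eq V i j _ pre (nbrs_zero_zero i j hi0 hj0)
      (by rwa [nbrs_zero_zero i j hi0 hj0] at hmem) ?_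
    simp [Prod.ext_iff] <;> omega
  · rw [if_neg (by omega), if_neg (by omega), if_pos ⟨hi0, hj0⟩]
    refine body_eq V i j _ pre (nbrs_zero_pos i j hi0 hj0)
      (by rwa [nbrs_zero_pos i j hi0 hj0] at hmem) ?_
    simp [Prod.ext_iff] <;> omega
  · rw [if_neg (by omega), if_pos ⟨hi0, hj0⟩]
    refine body_eq V i j _ pre (nbrs_pos_zero i j hi0 hj0)
      (by rwa [nbrs_pos_zero i j hi0 hj0] at hmem) ?_
    simp [Prod.ext_iff] <;> omega
  · rw [if_pos ⟨hi0, hj0⟩]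
    refine body_eq V i j _ pre (nbrs_pos_pos i j hi0 hj0)
      (by rwa [nbrs_pos_pos i j hi0 hj0] at hmem) ?_
    simp [Prod.ext_iff] <;> omega
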